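-- pv_equiv track=rewrite | github.com/goddls123/Algolithm | 해시/전화번호 목록.py | solution
-- ===== SOURCE A (Python) =====
-- def solution(phone_book):
--     answer = True
--     phone_book.sort()
--
--     for i in range(0, len(phone_book)-1):
--         flag = True
--         for j in range(len(phone_book[i])):
--             if phone_book[i+1][j]!=phone_book[i][j]:
--                 flag=False
--                 break
--         if flag :
--             answer =False
--             break
--     return answer
-- ===== SOURCE B (Python) =====
-- def solution(phone_book):
--     # Set-based prefix lookup instead of sort + adjacent scan.
--     # Note: A sorts phone_book in place; B does not mutate its argument
--     # (the equivalence claimed is about the return value only).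
--     s = set(phone_book)
--     if len(s) != len(phone_book):
--         return False  # a duplicate: equal numbers prefix each other
--     for p in phone_book:
--         for L in range(len(p)):
--             if p[:L] in s:
--                 return False
--     return True
-- ===== Notes on version B (the rewrite author's own statement) =====
-- stated objective: idiomatic
-- what changed: Replaces A's in-place sort followed by an adjacent-pair character-by-character prefix scan with a duplicate check (len(set) vs len) plus a hash-set lookup of every proper prefix of every number; B does not mutate phone_book (A leaves it sorted) — the equivalence is about the return value.
import Mathlib
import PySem

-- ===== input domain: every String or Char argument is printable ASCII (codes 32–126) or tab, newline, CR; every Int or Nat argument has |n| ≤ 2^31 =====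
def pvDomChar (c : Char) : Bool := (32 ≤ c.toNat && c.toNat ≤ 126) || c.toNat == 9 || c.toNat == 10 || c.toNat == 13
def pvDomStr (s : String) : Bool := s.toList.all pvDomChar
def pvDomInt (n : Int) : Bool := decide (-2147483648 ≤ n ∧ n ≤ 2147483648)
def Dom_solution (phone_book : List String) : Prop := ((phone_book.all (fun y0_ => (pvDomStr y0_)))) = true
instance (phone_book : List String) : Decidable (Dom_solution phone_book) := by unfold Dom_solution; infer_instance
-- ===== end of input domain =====

-- B replaces A's sort + adjacent-pair scan by a duplicate check plus set lookups of every
-- proper prefix (alternative algorithm; A also sorts phone_book in place and B does not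
-- mutate its argument — the equivalence proved here is about the return value only).

-- ===== PORT A =====
-- inner loop 'for j in range(len(cur)): if nxt[j] != cur[j]: flag = False; break';
-- 'none' models the IndexError from nxt[j]: it is unreachable after the sort
-- (lemma aLoop_eq_of_pairwise below), so A is total
def flagLoop : List Char → List Char → Option Bool
  | [], _ => some true
  | _ :: _, [] => none
  | c :: cs, d :: ds => if d ≠ c then some false else flagLoop cs ds

-- outer loop 'for i in range(0, len(phone_book)-1)' over adjacent pairs, with both breaks
def aLoop : List String → Option Bool
  | [] => some true
  | [_] => some true
  | cur :: nxt :: rest =>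
    match flagLoop cur.toList nxt.toList with
    | none => none
    | some true => some false
    | some false => aLoop (nxt :: rest)

def solution (phone_book : List String) : Bool :=
  (aLoop (PySem.List.sorted phone_book (fun x => x) false)).getD true

-- ===== PORT B =====
def solution_alt (phone_book : List String) : Bool :=
  let s : PySem.Set String := PySem.Set.ofList phone_book
  if PySem.List.len s ≠ PySem.List.len phone_book then false
  else !phone_book.any (fun p =>
    (PySem.List.pyRange 0 (PySem.Str.len p) 1).any (fun L =>
      PySem.Set.contains s (PySem.Str.slice p none (some L))))

-- ===== PRECONDITION & SPEC =====
def Spec_solution (phone_book : List String) (out : Bool) : Prop := out = solution_alt phone_book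
instance (phone_book : List String) (out : Bool) : Decidable (Spec_solution phone_book out) := by unfold Spec_solution; infer_instance

-- ===== CLAIM (what is proved, stated in full; the proofs are below) =====
def Claim_equal_solution : Prop := ∀ (phone_book : List String), Dom_solution phone_book → Spec_solution phone_book (solution phone_book)

-- ===== LEMMAS AND PROOFS =====

-- "some string occurs at two distinct positions of l, the first a prefix of the second"
def PP (l : List String) : Prop :=
  ∃ x y : String, x.toList <+: y.toList ∧
    ((x ≠ y ∧ x ∈ l ∧ y ∈ l) ∨ (x = y ∧ 2 ≤ l.count x))

-- the adjacent-pair prefix test that aLoop computes (modulo the unreachable IndexError)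
def hasAdjPrefix : List String → Bool
  | [] => false
  | [_] => false
  | cur :: nxt :: rest => cur.toList.isPrefixOf nxt.toList || hasAdjPrefix (nxt :: rest)

theorem flagLoop_eq (cs ds : List Char) :
    flagLoop cs ds =
      if cs <+: ds then some true else if ds <+: cs then none else some false := by
  induction cs generalizing ds with
  | nil => simp [flagLoop]
  | cons c cs ih =>
    cases ds with
    | nil => simp [flagLoop]
    | cons d ds =>
      by_cases h : d = c
      · subst h
        simp [flagLoop, ih, List.cons_prefix_cons]
      · simp [flagLoop, h, List.cons_prefix_cons, Ne.symm h]

theorem lex_append_cons (l : List Char) (c : Char) (t : List Char) :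
    List.Lex (· < ·) l (l ++ c :: t) := by
  induction l with
  | nil => exact List.Lex.nil
  | cons a l ih => exact List.Lex.cons ih

theorem strict_prefix_lex_lt {xs ys : List Char} (h : xs <+: ys) (hne : xs ≠ ys) :
    xs < ys := by
  obtain ⟨t, rfl⟩ := h
  cases t with
  | nil => simp at hne
  | cons c t => exact lex_append_cons xs c t

theorem prefix_between {xs ys zs : List Char} (h : xs <+: ys)
    (h1 : xs ≤ zs) (h2 : zs ≤ ys) : xs <+: zs := by
  have h1' : ¬ List.Lex (· < ·) zs xs := not_lt.mpr h1
  have h2' : ¬ List.Lex (· < ·) ys zs := not_lt.mpr h2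
  clear h1 h2
  induction xs generalizing ys zs with
  | nil => exact List.nil_prefix
  | cons a xs ih =>
    cases ys with
    | nil => exact absurd h (by simp)
    | cons b ys =>
      obtain ⟨rfl, hpre⟩ := List.cons_prefix_cons.mp h
      cases zs with
      | nil => exact absurd List.Lex.nil h1'
      | cons e zs =>
        rcases lt_trichotomy e a with hea | rfl | hae
        · exact absurd (List.Lex.rel hea) h1'
        · exact List.cons_prefix_cons.mpr ⟨rfl, ih hpre
            (fun hl => h1' (List.Lex.cons hl)) (fun hl => h2' (List.Lex.cons hl))⟩
        · exact absurd (List.Lex.rel hae) h2'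

theorem aLoop_eq_of_pairwise {s : List String} (hp : s.Pairwise (· ≤ ·)) :
    aLoop s = some (!hasAdjPrefix s) := by
  induction s with
  | nil => rfl
  | cons x t ih =>
    cases t with
    | nil => rfl
    | cons y rest =>
      have hxy : x ≤ y := (List.pairwise_cons.mp hp).1 y (by simp)
      have htl : (y :: rest).Pairwise (· ≤ ·) := (List.pairwise_cons.mp hp).2
      show (match flagLoop x.toList y.toList with
        | none => none
        | some true => some false
        | some false => aLoop (y :: rest)) = _
      rw [flagLoop_eq]
      by_cases hpre : x.toList <+: y.toList
      · simp [hpre, hasAdjPrefix, List.isPrefixOf_iff_prefix]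
      · have hnp : ¬ y.toList <+: x.toList := by
          intro hyx
          by_cases heq : y.toList = x.toList
          · exact hpre (heq ▸ List.prefix_refl _)
          · have : y < x := String.lt_iff_toList_lt.mpr (strict_prefix_lex_lt hyx heq)
            exact absurd hxy (not_le.mpr this)
        simp only [hpre, hnp, if_false]
        rw [ih htl]
        have hf : x.toList.isPrefixOf y.toList = false := by
          rw [← Bool.not_eq_true, List.isPrefixOf_iff_prefix]; exact hpre
        simp [hasAdjPrefix, hf]

theorem PP_cons {a : String} {l : List String} (h : PP l) : PP (a :: l) := by
  obtain ⟨x, y, hpre, hc⟩ := h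
  refine ⟨x, y, hpre, ?_⟩
  rcases hc with ⟨hne, hx, hy⟩ | ⟨rfl, hcnt⟩
  · exact Or.inl ⟨hne, List.mem_cons_of_mem a hx, List.mem_cons_of_mem a hy⟩
  · refine Or.inr ⟨rfl, ?_⟩
    simp only [List.count_cons]
    omega

theorem PP_perm {l l' : List String} (hp : l.Perm l') (h : PP l) : PP l' := by
  obtain ⟨x, y, hpre, hc⟩ := h
  refine ⟨x, y, hpre, ?_⟩
  rcases hc with ⟨hne, hx, hy⟩ | ⟨rfl, hcnt⟩
  · exact Or.inl ⟨hne, hp.mem_iff.mp hx, hp.mem_iff.mp hy⟩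
  · exact Or.inr ⟨rfl, hp.count_eq x ▸ hcnt⟩

theorem PP_of_hasAdjPrefix {s : List String} (h : hasAdjPrefix s = true) : PP s := by
  induction s with
  | nil => simp [hasAdjPrefix] at h
  | cons x t ih =>
    cases t with
    | nil => simp [hasAdjPrefix] at h
    | cons y rest =>
      rcases Bool.or_eq_true_iff.mp h with hpre | htail
      · have hpre' : x.toList <+: y.toList := List.isPrefixOf_iff_prefix.mp hpre
        by_cases hxy : x = y
        · exact ⟨x, y, hpre', Or.inr ⟨hxy, by subst hxy; simp⟩⟩
        · exact ⟨x, y, hpre', Or.inl ⟨hxy, by simp, by simp⟩⟩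
      · exact PP_cons (ih htail)

theorem sublist_pair_of_mem_lt {x y : String} {s : List String}
    (hp : s.Pairwise (· ≤ ·)) (hx : x ∈ s) (hy : y ∈ s) (hxy : x < y) :
    List.Sublist [x, y] s := by
  induction s with
  | nil => simp at hx
  | cons a t ih =>
    by_cases hxa : x = a
    · subst hxa
      rcases List.mem_cons.mp hy with rfl | hyt
      · exact absurd hxy (lt_irrefl _)
      · exact List.Sublist.cons₂ x (List.singleton_sublist.mpr hyt)
    · have hxt : x ∈ t := (List.mem_cons.mp hx).resolve_left hxa
      rcases List.mem_cons.mp hy with rfl | hyt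
      · have : y ≤ x := (List.pairwise_cons.mp hp).1 x hxt
        exact absurd hxy (not_lt.mpr this)
      · exact List.Sublist.cons a (ih (List.pairwise_cons.mp hp).2 hxt hyt)

theorem hasAdjPrefix_of_sublist {x y : String} {s : List String}
    (hp : s.Pairwise (· ≤ ·)) (hpre : x.toList <+: y.toList)
    (hsub : List.Sublist [x, y] s) :
    hasAdjPrefix s = true := by
  induction s with
  | nil => simp at hsub
  | cons a t ih =>
    cases hsub with
    | cons _ h1 =>
      cases t with
      | nil => simp at h1
      | cons b rest =>
        have : hasAdjPrefix (b :: rest) = true :=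
          ih (List.pairwise_cons.mp hp).2 h1
        simp [hasAdjPrefix, this]
    | cons₂ _ h2 =>
      have hyt : y ∈ t := List.singleton_sublist.mp h2
      cases t with
      | nil => simp at hyt
      | cons b rest =>
        have hab : x ≤ b := (List.pairwise_cons.mp hp).1 b (by simp)
        have hby : b ≤ y := by
          rcases List.mem_cons.mp hyt with rfl | hyr
          · exact le_refl _
          · exact (List.pairwise_cons.mp (List.pairwise_cons.mp hp).2).1 y hyr
        have hxb : x.toList <+: b.toList :=
          prefix_between hpre (String.le_iff_toList_le.mp hab)
            (String.le_iff_toList_le.mp hby)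
        simp [hasAdjPrefix, List.isPrefixOf_iff_prefix, hxb]

theorem hasAdjPrefix_of_PP {s : List String} (hp : s.Pairwise (· ≤ ·)) (h : PP s) :
    hasAdjPrefix s = true := by
  obtain ⟨x, y, hpre, hc⟩ := h
  rcases hc with ⟨hne, hx, hy⟩ | ⟨rfl, hcnt⟩
  · have hne' : x.toList ≠ y.toList := fun hteq => hne (String.toList_inj.mp hteq)
    have hlt : x < y := String.lt_iff_toList_lt.mpr (strict_prefix_lex_lt hpre hne')
    exact hasAdjPrefix_of_sublist hp hpre (sublist_pair_of_mem_lt hp hx hy hlt)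
  · have hsub : List.Sublist [x, x] s := by
      have := List.replicate_sublist_iff.mpr hcnt
      simpa using this
    exact hasAdjPrefix_of_sublist hp hpre hsub

theorem foldl_add_length_le (l : List String) : ∀ s : List String,
    (List.foldl PySem.Set.add s l).length ≤ s.length + l.length := by
  induction l with
  | nil => intro s; simp
  | cons x l ih =>
    intro s
    simp only [List.foldl_cons]
    refine le_trans (ih (PySem.Set.add s x)) ?_
    have : (PySem.Set.add s x).length ≤ s.length + 1 := by
      unfold PySem.Set.add
      split <;> simp
    simp only [List.length_cons]
    omega

theorem foldl_add_length_eq_iff (l : List String) : ∀ s : List String,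
    (List.foldl PySem.Set.add s l).length = s.length + l.length ↔
      l.Nodup ∧ ∀ x ∈ l, x ∉ s := by
  induction l with
  | nil => intro s; simp
  | cons x l ih =>
    intro s
    simp only [List.foldl_cons]
    by_cases hc : x ∈ s
    · have hadd : PySem.Set.add s x = s := by
        unfold PySem.Set.add; simp [hc]
      rw [hadd]
      have hle := foldl_add_length_le l s
      constructor
      · intro h; simp at h; omega
      · rintro ⟨-, hall⟩; exact absurd hc (hall x (by simp))
    · have hadd : PySem.Set.add s x = s ++ [x] := by
        unfold PySem.Set.add; simp [hc]
      rw [hadd, show s.length + (x :: l).length = (s ++ [x]).length + l.length by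
        simp; omega, ih (s ++ [x])]
      simp only [List.nodup_cons, List.mem_cons, List.mem_append]
      constructor
      · rintro ⟨hnd, hall⟩
        refine ⟨⟨fun hxl => (hall x hxl) (Or.inr (Or.inl rfl)), hnd⟩, ?_⟩
        rintro y (rfl | hyl)
        · exact hc
        · exact fun hys => hall y hyl (Or.inl hys)
      · rintro ⟨⟨hxl, hnd⟩, hall⟩
        refine ⟨hnd, fun y hyl => ?_⟩
        rintro (hys | rfl | hnil)
        · exact hall y (Or.inr hyl) hys
        · exact hxl hyl
        · simp at hnil

theorem length_ofList_eq_iff_nodup (l : List String) :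
    (PySem.Set.ofList l).length = l.length ↔ l.Nodup := by
  rw [PySem.Set.ofList_eq_foldl]
  have := foldl_add_length_eq_iff l []
  simpa using this

theorem PP_of_not_nodup {l : List String} (h : ¬ l.Nodup) : PP l := by
  rw [List.nodup_iff_count_le_one] at h
  obtain ⟨x, hx⟩ := not_forall.mp h
  exact ⟨x, x, List.prefix_refl _, Or.inr ⟨rfl, by omega⟩⟩

theorem solution_false_iff (l : List String) : solution l = false ↔ PP l := by
  have hperm : (PySem.List.sorted l (fun x => x) false).Perm l :=
    PySem.List.sorted_perm l (fun x => x) false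
  have hpair : (PySem.List.sorted l (fun x => x) false).Pairwise (· ≤ ·) := by
    have := PySem.List.sorted_pairwise (xs := l) (key := fun x : String => x)
    simpa using this
  unfold solution
  rw [aLoop_eq_of_pairwise hpair]
  simp only [Option.getD_some, Bool.not_eq_false']
  constructor
  · intro h; exact PP_perm hperm (PP_of_hasAdjPrefix h)
  · intro h; exact hasAdjPrefix_of_PP hpair (PP_perm hperm.symm h)

theorem solution_alt_false_iff (l : List String) : solution_alt l = false ↔ PP l := by
  unfold solution_alt
  by_cases hnd : l.Nodup
  · have hlen : PySem.List.len (PySem.Set.ofList l) = PySem.List.len l := by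
      simp only [PySem.List.len_eq]
      exact_mod_cast (length_ofList_eq_iff_nodup l).mpr hnd
    simp only [hlen, ne_eq, not_true_eq_false, if_neg, Bool.not_eq_false',
      not_false_eq_true]
    rw [List.any_eq_true]
    constructor
    · rintro ⟨p, hp, hany⟩
      rw [List.any_eq_true] at hany
      obtain ⟨L, hLmem, hcont⟩ := hany
      obtain ⟨hL0, hLlt⟩ := PySem.List.mem_pyRange_one.mp hLmem
      have hlen_p : PySem.Str.len p = (p.toList.length : Int) := by simp [pysem]
      rw [hlen_p] at hLlt
      set x := PySem.Str.slice p none (some L) with hxdef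
      have hxl : x.toList = p.toList.take L.toNat := by
        simp [hxdef, PySem.List.slice_to _ hL0]
      have hxmem : x ∈ l := by
        have hm : x ∈ PySem.Set.ofList l := by simpa using hcont
        exact (PySem.Set.mem_ofList l x).mp hm
      have hpre : x.toList <+: p.toList := hxl ▸ List.take_prefix _ _
      have hxlen : x.toList.length < p.toList.length := by
        rw [hxl, List.length_take]
        omega
      have hne : x ≠ p := by
        intro hxe; rw [hxe] at hxlen; omega
      exact ⟨x, p, hpre, Or.inl ⟨hne, hxmem, hp⟩⟩
    · intro h
      obtain ⟨x, y, hpre, hc⟩ := h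
      rcases hc with ⟨hne, hx, hy⟩ | ⟨rfl, hcnt⟩
      · refine ⟨y, hy, ?_⟩
        rw [List.any_eq_true]
        have hne' : x.toList ≠ y.toList := fun hteq => hne (String.toList_inj.mp hteq)
        have hlt : x.toList.length < y.toList.length := by
          rcases Nat.lt_or_ge x.toList.length y.toList.length with h | h
          · exact h
          · have hle := hpre.length_le
            have : x.toList.length = y.toList.length := by omega
            exact absurd (hpre.eq_of_length this) hne'
        refine ⟨(x.toList.length : Int), ?_, ?_⟩
        · apply PySem.List.mem_pyRange_one.mpr
          have hlen_y : PySem.Str.len y = (y.toList.length : Int) := by simp [pysem]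
          rw [hlen_y]
          constructor <;> [positivity; exact_mod_cast hlt]
        · have hslice : PySem.Str.slice y none (some (x.toList.length : Int)) = x := by
            apply String.toList_inj.mp
            have : (PySem.Str.slice y none (some (x.toList.length : Int))).toList
                = y.toList.take x.toList.length := by
              simp
            rw [this]
            exact (List.prefix_iff_eq_take.mp hpre).symm
          rw [hslice]
          simpa using (PySem.Set.mem_ofList l x).mpr hx
      · exact absurd hnd (by
          rw [List.nodup_iff_count_le_one]
          intro hall
          exact absurd (hall x) (by omega))
  · have hlen : (PySem.Set.ofList l).length ≠ l.length := by
      rw [Ne, length_ofList_eq_iff_nodup]; exact hnd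
    have : PySem.List.len (PySem.Set.ofList l) ≠ PySem.List.len l := by
      simp only [PySem.List.len_eq]
      exact_mod_cast hlen
    rw [if_pos this]
    exact iff_of_true rfl (PP_of_not_nodup hnd)

-- ===== VERDICT (by name: the statement is the Claim_ definition above) =====
theorem solution_spec : Claim_equal_solution := by
  intro l _
  unfold Spec_solution
  have h := (solution_false_iff l).trans (solution_alt_false_iff l).symm
  cases ha : solution l <;> cases hb : solution_alt l <;> simp_all
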